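-- pv_equiv track=rewrite | github.com/aioue/any.down | find_duplicate_tasks.py | find_near_duplicates
-- ===== SOURCE A (Python) =====
-- from collections import defaultdict
-- from typing import Dict, List, Any
--
-- def find_near_duplicates(tasks: List[Dict[str, Any]]) -> Dict[str, List[Dict[str, Any]]]:
--     """Find tasks with very similar titles (case-insensitive, ignoring punctuation)."""
--     normalized_groups = defaultdict(list)
--
--     for task in tasks:
--         title = task.get('title', '').strip()
--         if title:
--             # Normalize: lowercase, remove punctuation, collapse whitespace
--             normalized = ''.join(c.lower() for c in title if c.isalnum() or c.isspace())
--             normalized = ' '.join(normalized.split())  # Collapse whitespace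
--             if normalized:
--                 normalized_groups[normalized].append(task)
--
--     # Only return groups with more than one task
--     duplicates = {norm_title: task_list for norm_title, task_list in normalized_groups.items() if len(task_list) > 1}
--     return duplicates
-- ===== SOURCE B (Python) =====
-- def find_near_duplicates(tasks):
--     pairs = []
--     for task in tasks:
--         title = task.get('title', '').strip()
--         if title:
--             normalized = ''.join(c.lower() for c in title if c.isalnum() or c.isspace())
--             normalized = ' '.join(normalized.split())
--             if normalized:
--                 pairs.append((normalized, task))
--     return _collect(pairs)
--
--
-- def _collect(pairs):
--     """Recursively peel off the first key's whole group, then recurse on the rest."""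
--     if not pairs:
--         return {}
--     key = pairs[0][0]
--     group = [t for k, t in pairs if k == key]
--     remaining = [(k, t) for k, t in pairs if k != key]
--     rest = _collect(remaining)
--     if len(group) > 1:
--         result = {key: group}
--         result.update(rest)
--         return result
--     return rest
-- ===== Notes on version B (the rewrite author's own statement) =====
-- stated objective: alternative
-- what changed: B keeps A's normalization but replaces the hash-grouping defaultdict-plus-filter with a recursive partition: it peels off the first remaining key, extracts that key's whole group by a scan, recurses on the pairs with other keys, and emits the group only when it has more than one member.
import Mathlib
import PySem

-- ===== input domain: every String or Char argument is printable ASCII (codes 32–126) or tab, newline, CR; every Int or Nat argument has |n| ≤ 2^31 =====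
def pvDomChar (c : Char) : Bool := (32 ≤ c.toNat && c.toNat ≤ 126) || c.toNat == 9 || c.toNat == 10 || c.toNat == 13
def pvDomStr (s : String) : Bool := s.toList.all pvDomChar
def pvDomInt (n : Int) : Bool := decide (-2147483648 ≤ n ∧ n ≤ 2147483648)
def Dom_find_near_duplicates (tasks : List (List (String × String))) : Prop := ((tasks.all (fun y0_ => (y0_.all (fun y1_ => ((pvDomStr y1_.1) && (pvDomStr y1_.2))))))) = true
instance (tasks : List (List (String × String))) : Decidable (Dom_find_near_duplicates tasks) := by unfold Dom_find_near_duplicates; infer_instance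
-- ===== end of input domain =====

-- B replaces A's hash-grouping dict with a recursive partition (peel off the first key's whole group, recurse on the rest); same result, alternative decomposition.

-- ===== PORT A =====
def find_near_duplicates (tasks : List (List (String × String))) : List (String × List (List (String × String))) :=
  (tasks.foldl (fun d task =>
      let title := PySem.Str.strip ((PySem.Dict.mk task).getD "title" "")
      if title.toList ≠ [] then
        let n1 := (title.toList.filter (fun c => PySem.Chars.isalnum c || PySem.Chars.isspace c)).map PySem.Chars.lowerChar
        let n2 := PySem.Chars.join [' '] (PySem.Chars.split₀ n1)
        if n2 ≠ [] then d.modify (String.ofList n2) [] (· ++ [task]) else d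
      else d)
    PySem.Dict.empty).items.filter (fun p => decide (1 < p.2.length))

-- ===== PORT B =====
-- helper `_collect` of Source B: recursive partition by the first key
def pvCollect : List (String × List (String × String)) → PySem.Dict String (List (List (String × String)))
  | [] => PySem.Dict.empty
  | (key, t) :: rest =>
    let group := (((key, t) :: rest).filter (fun p => p.1 == key)).map Prod.snd
    let remaining := ((key, t) :: rest).filter (fun p => !(p.1 == key))
    let restD := pvCollect remaining
    if 1 < group.length then (PySem.Dict.empty.insert key group).update restD.items else restD
termination_by pairs => pairs.length
decreasing_by
  simp only [List.filter_cons, BEq.refl, Bool.not_true, List.length_cons]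
  exact Nat.lt_succ_of_le (List.length_filter_le _ _)

def find_near_duplicates_alt (tasks : List (List (String × String))) : List (String × List (List (String × String))) :=
  let pairs := tasks.foldl (fun acc task =>
      let title := PySem.Str.strip ((PySem.Dict.mk task).getD "title" "")
      if title.toList ≠ [] then
        let n1 := (title.toList.filter (fun c => PySem.Chars.isalnum c || PySem.Chars.isspace c)).map PySem.Chars.lowerChar
        let n2 := PySem.Chars.join [' '] (PySem.Chars.split₀ n1)
        if n2 ≠ [] then acc ++ [(String.ofList n2, task)] else acc
      else acc) []
  (pvCollect pairs).items

-- ===== PRECONDITION & SPEC =====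
def Spec_find_near_duplicates (tasks : List (List (String × String))) (out : List (String × List (List (String × String)))) : Prop := out = find_near_duplicates_alt tasks
instance (tasks : List (List (String × String))) (out : List (String × List (List (String × String)))) : Decidable (Spec_find_near_duplicates tasks out) := by unfold Spec_find_near_duplicates; infer_instance

-- ===== CLAIM (what is proved, stated in full; the proofs are below) =====
def Claim_equal_find_near_duplicates : Prop := ∀ (tasks : List (List (String × String))), Dom_find_near_duplicates tasks → Spec_find_near_duplicates tasks (find_near_duplicates tasks)

-- ===== LEMMAS AND PROOFS =====

-- the normalized key of a task (None = skipped), and the kept (key, task) pairs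
def pvNormKey (task : List (String × String)) : Option String :=
  let title := PySem.Str.strip ((PySem.Dict.mk task).getD "title" "")
  if title.toList = [] then none
  else
    let n1 := (title.toList.filter (fun c => PySem.Chars.isalnum c || PySem.Chars.isspace c)).map PySem.Chars.lowerChar
    let n2 := PySem.Chars.join [' '] (PySem.Chars.split₀ n1)
    if n2 = [] then none else some (String.ofList n2)

def pvPairs (tasks : List (List (String × String))) : List (String × List (String × String)) :=
  tasks.filterMap (fun t => (pvNormKey t).map (fun k => (k, t)))

def pvStep (d : PySem.Dict String (List (List (String × String)))) (p : String × List (String × String)) :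
    PySem.Dict String (List (List (String × String))) :=
  d.modify p.1 [] (· ++ [p.2])

-- the common value: for each distinct key (first-occurrence order) its group, keeping only groups of size > 1
def pvTarget (ps : List (String × List (String × String))) : List (String × List (List (String × String))) :=
  ((PySem.Set.ofList (ps.map Prod.fst)).map
      (fun k => (k, (ps.filter (fun p => p.1 == k)).map Prod.snd))).filter
    (fun pr => decide (1 < pr.2.length))

-- A's loop body is pvStep through pvNormKey
theorem pvA_body (d : PySem.Dict String (List (List (String × String)))) (task : List (String × String)) :
    (let title := PySem.Str.strip ((PySem.Dict.mk task).getD "title" "")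
     if title.toList ≠ [] then
       let n1 := (title.toList.filter (fun c => PySem.Chars.isalnum c || PySem.Chars.isspace c)).map PySem.Chars.lowerChar
       let n2 := PySem.Chars.join [' '] (PySem.Chars.split₀ n1)
       if n2 ≠ [] then d.modify (String.ofList n2) [] (· ++ [task]) else d
     else d)
    = match pvNormKey task with
      | some k => pvStep d (k, task)
      | none => d := by
  simp only [pvNormKey, pvStep]
  by_cases h1 : (PySem.Str.strip ((PySem.Dict.mk task).getD "title" "")).toList = []
  · simp [h1]
  · by_cases h2 : PySem.Chars.join [' '] (PySem.Chars.split₀ ((((PySem.Str.strip ((PySem.Dict.mk task).getD "title" "")).toList).filter (fun c => PySem.Chars.isalnum c || PySem.Chars.isspace c)).map PySem.Chars.lowerChar)) = []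
    · simp only [PySem.Str.toList_strip] at h1 h2 ⊢
      simp [h1, h2]
    · simp only [PySem.Str.toList_strip] at h1 h2 ⊢
      simp [h1, h2]

-- A's fold over tasks is the grouping fold over pvPairs
theorem pvA_fold (tasks : List (List (String × String))) (d : PySem.Dict String (List (List (String × String)))) :
    tasks.foldl (fun d task =>
      let title := PySem.Str.strip ((PySem.Dict.mk task).getD "title" "")
      if title.toList ≠ [] then
        let n1 := (title.toList.filter (fun c => PySem.Chars.isalnum c || PySem.Chars.isspace c)).map PySem.Chars.lowerChar
        let n2 := PySem.Chars.join [' '] (PySem.Chars.split₀ n1)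
        if n2 ≠ [] then d.modify (String.ofList n2) [] (· ++ [task]) else d
      else d) d
    = (pvPairs tasks).foldl pvStep d := by
  induction tasks generalizing d with
  | nil => rfl
  | cons t ts ih =>
    have hp : pvPairs (t :: ts)
        = (match pvNormKey t with | some k => [(k, t)] | none => []) ++ pvPairs ts := by
      cases h : pvNormKey t <;> simp [pvPairs, h]
    rw [List.foldl_cons, pvA_body d t, ih, hp]
    cases pvNormKey t <;> simp

-- B's pair-collection loop body through pvNormKey
theorem pvB_body (acc : List (String × List (String × String))) (task : List (String × String)) :
    (let title := PySem.Str.strip ((PySem.Dict.mk task).getD "title" "")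
     if title.toList ≠ [] then
       let n1 := (title.toList.filter (fun c => PySem.Chars.isalnum c || PySem.Chars.isspace c)).map PySem.Chars.lowerChar
       let n2 := PySem.Chars.join [' '] (PySem.Chars.split₀ n1)
       if n2 ≠ [] then acc ++ [(String.ofList n2, task)] else acc
     else acc)
    = match pvNormKey task with
      | some k => acc ++ [(k, task)]
      | none => acc := by
  simp only [pvNormKey]
  by_cases h1 : (PySem.Str.strip ((PySem.Dict.mk task).getD "title" "")).toList = []
  · simp [h1]
  · by_cases h2 : PySem.Chars.join [' '] (PySem.Chars.split₀ ((((PySem.Str.strip ((PySem.Dict.mk task).getD "title" "")).toList).filter (fun c => PySem.Chars.isalnum c || PySem.Chars.isspace c)).map PySem.Chars.lowerChar)) = []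
    · simp only [PySem.Str.toList_strip] at h1 h2 ⊢
      simp [h1, h2]
    · simp only [PySem.Str.toList_strip] at h1 h2 ⊢
      simp [h1, h2]

-- B's pair-collection loop is pvPairs
theorem pvB_pairs (tasks : List (List (String × String))) (acc : List (String × List (String × String))) :
    tasks.foldl (fun acc task =>
      let title := PySem.Str.strip ((PySem.Dict.mk task).getD "title" "")
      if title.toList ≠ [] then
        let n1 := (title.toList.filter (fun c => PySem.Chars.isalnum c || PySem.Chars.isspace c)).map PySem.Chars.lowerChar
        let n2 := PySem.Chars.join [' '] (PySem.Chars.split₀ n1)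
        if n2 ≠ [] then acc ++ [(String.ofList n2, task)] else acc
      else acc) acc = acc ++ pvPairs tasks := by
  induction tasks generalizing acc with
  | nil => simp [pvPairs]
  | cons t ts ih =>
    rw [List.foldl_cons, pvB_body acc t, ih]
    have hp : pvPairs (t :: ts)
        = (match pvNormKey t with | some k => [(k, t)] | none => []) ++ pvPairs ts := by
      cases h : pvNormKey t <;> simp [pvPairs, h]
    rw [hp]
    cases pvNormKey t <;> simp

-- filtering a Set.add
theorem pvAdd_filter {a : Type} [BEq a] [LawfulBEq a] (p : a → Bool) (s : PySem.Set a) (x : a) :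
    (PySem.Set.add s x).filter p = if p x then PySem.Set.add (s.filter p) x else s.filter p := by
  by_cases hp : p x
  · by_cases hm : x ∈ s
    · have hm2 : x ∈ s.filter p := List.mem_filter.mpr ⟨hm, hp⟩
      simp [PySem.Set.add, PySem.Set.contains, hm, hm2, hp]
    · have hm2 : x ∉ s.filter p := fun h => hm (List.mem_filter.mp h).1
      simp [PySem.Set.add, PySem.Set.contains, hm, hm2, hp, List.filter_append]
  · by_cases hm : x ∈ s <;>
      simp [PySem.Set.add, PySem.Set.contains, hm, hp, List.filter_append]

-- Set.ofList commutes with filter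
theorem pvFoldl_add_filter {a : Type} [BEq a] [LawfulBEq a] (p : a → Bool) (l : List a) (s : PySem.Set a) :
    (l.foldl PySem.Set.add s).filter p = (l.filter p).foldl PySem.Set.add (s.filter p) := by
  induction l generalizing s with
  | nil => rfl
  | cons x l ih =>
    by_cases hp : p x <;>
      simp [hp, ih (PySem.Set.add s x), pvAdd_filter p s x]

theorem pvOfList_filter {a : Type} [BEq a] [LawfulBEq a] (p : a → Bool) (l : List a) :
    PySem.Set.ofList (l.filter p) = (PySem.Set.ofList l).filter p := by
  rw [PySem.Set.ofList_eq_foldl, PySem.Set.ofList_eq_foldl, pvFoldl_add_filter]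
  rfl

-- characterization of A's grouping fold
theorem pvG_items (l : List (String × List (String × String))) :
    (l.foldl pvStep PySem.Dict.empty).items
    = (PySem.Set.ofList (l.map Prod.fst)).map
        (fun k => (k, (l.filter (fun p => p.1 == k)).map Prod.snd)) := by
  have hnd : (l.foldl pvStep PySem.Dict.empty).keys.Nodup := by
    simpa [pvStep] using
      PySem.Dict.nodup_keys_foldl_modify_key l Prod.fst [] (fun d x => (· ++ [x.2]))
        PySem.Dict.empty (by simp)
  rw [PySem.Dict.items_eq_map_keys _ hnd []]
  have hkeys : (l.foldl pvStep PySem.Dict.empty).keys = PySem.Set.ofList (l.map Prod.fst) := by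
    simpa [pvStep] using
      PySem.Dict.keys_foldl_modify_key l Prod.fst (d0 := []) (f := fun d x => (· ++ [x.2]))
        PySem.Dict.empty
  rw [hkeys]
  refine List.map_congr_left (fun k hk => ?_)
  have h : (l.foldl pvStep PySem.Dict.empty).getD k []
      = PySem.Dict.empty.getD k [] ++ (l.filter (fun p => p.1 == k)).map (·.2) :=
    PySem.Dict.getD_foldl_modify_append l PySem.Dict.empty k
  rw [h]
  simp

-- the key list of pvTarget: a filter of the deduplicated key list (hence Nodup)
theorem pvTarget_keys (ps : List (String × List (String × String))) :
    (pvTarget ps).map Prod.fst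
    = (PySem.Set.ofList (ps.map Prod.fst) : List String).filter
        (fun k => decide (1 < (ps.filter (fun p => p.1 == k)).length)) := by
  unfold pvTarget
  rw [List.filter_map, List.map_map]
  simp [Function.comp_def]

theorem pvTarget_nodup_keys (ps : List (String × List (String × String))) :
    ((pvTarget ps).map Prod.fst).Nodup := by
  rw [pvTarget_keys]
  exact (PySem.Set.nodup_ofList _).filter _

theorem pvTarget_mem_fst (ps : List (String × List (String × String)))
    (p : String × List (List (String × String))) (hp : p ∈ pvTarget ps) :
    p.1 ∈ ps.map Prod.fst := by
  have h1 := (List.mem_filter.mp hp).1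
  obtain ⟨k, hk, hgk⟩ := List.mem_map.mp h1
  have : p.1 = k := by rw [← hgk]
  rw [this]
  exact (PySem.Set.mem_ofList _ _).mp hk

-- inserting a fresh key and then updating with fresh Nodup-keyed items is a cons
theorem pvFresh_update (key : String) (group : List (List (String × String)))
    (l : List (String × List (List (String × String))))
    (hnd : (l.map Prod.fst).Nodup) (hne : ∀ p ∈ l, p.1 ≠ key) :
    ((PySem.Dict.empty.insert key group).update l).items = (key, group) :: l := by
  have hfresh : ∀ p ∈ l, (PySem.Dict.empty.insert key group).contains p.1 = false := by
    intro p hp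
    simp [PySem.Dict.contains_insert, hne p hp]
  have h := PySem.Dict.items_foldl_insert_fresh l Prod.fst Prod.snd
    (PySem.Dict.empty.insert key group) hfresh hnd
  show (l.foldl (fun acc p => acc.insert p.1 p.2) (PySem.Dict.empty.insert key group)).items = _
  rw [h, PySem.Dict.items_insert_of_not_contains _ _ (by simp), show (PySem.Dict.empty : PySem.Dict String (List (List (String × String)))).items = [] from rfl]
  simp

-- pvTarget on a cons splits into the head key's group (kept iff > 1) and the target of the other keys
theorem pvTarget_cons (key : String) (t : List (String × String))
    (rest : List (String × List (String × String))) :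
    pvTarget ((key, t) :: rest)
    = (if 1 < ((((key, t) :: rest).filter (fun p => p.1 == key)).map Prod.snd).length
       then [(key, (((key, t) :: rest).filter (fun p => p.1 == key)).map Prod.snd)] else [])
      ++ pvTarget (((key, t) :: rest).filter (fun p => !(p.1 == key))) := by
  have hrem : ((key, t) :: rest).filter (fun p => !(p.1 == key))
      = rest.filter (fun p => !(p.1 == key)) := by
    simp
  have hmapfst : (rest.filter (fun p => !(p.1 == key))).map Prod.fst
      = (rest.map Prod.fst).filter (fun x => !(x == key)) := by
    rw [List.filter_map]
    rfl
  set G := (((key, t) :: rest).filter (fun p => p.1 == key)).map Prod.snd with hG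
  unfold pvTarget
  rw [hrem, List.map_cons, PySem.Set.ofList_cons]
  have hdisc : (PySem.Set.ofList (rest.map Prod.fst)).discard key
      = PySem.Set.ofList ((rest.filter (fun p => !(p.1 == key))).map Prod.fst) := by
    rw [hmapfst, pvOfList_filter]
    rfl
  rw [hdisc, List.map_cons, List.filter_cons]
  have htail : (PySem.Set.ofList ((rest.filter (fun p => !(p.1 == key))).map Prod.fst) : List String).map
        (fun k => (k, (((key, t) :: rest).filter (fun p => p.1 == k)).map Prod.snd))
      = (PySem.Set.ofList ((rest.filter (fun p => !(p.1 == key))).map Prod.fst) : List String).map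
        (fun k => (k, ((rest.filter (fun p => !(p.1 == key))).filter (fun p => p.1 == k)).map Prod.snd)) := by
    refine List.map_congr_left (fun k hk => ?_)
    have hkne : k ≠ key := by
      have hmem : k ∈ (rest.filter (fun p => !(p.1 == key))).map Prod.fst :=
        (PySem.Set.mem_ofList _ _).mp hk
      rw [hmapfst] at hmem
      have := List.mem_filter.mp hmem
      simpa using this.2
    have heq : ((key, t) :: rest).filter (fun p => p.1 == k)
        = (rest.filter (fun p => !(p.1 == key))).filter (fun p => p.1 == k) := by
      rw [List.filter_cons]
      have hne : ((key, t).1 == k) = false := by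
        simp only [beq_eq_false_iff_ne]
        exact fun h => hkne h.symm
      rw [hne, List.filter_filter]
      refine (List.filter_congr (fun p _ => ?_)).symm
      by_cases hpk : p.1 = k
      · simp [hpk, hkne]
      · simp [hpk]
    rw [heq]
  rw [htail]
  by_cases hlen : 1 < G.length
  · simp only [← hG, hlen, decide_true, if_true]
    rfl
  · simp only [← hG, hlen, decide_false, if_false]
    rfl

-- B's `_collect` computes pvTarget (strong induction on the number of pairs)
theorem pvCollect_items_aux (n : Nat) : ∀ ps : List (String × List (String × String)),
    ps.length ≤ n → (pvCollect ps).items = pvTarget ps := by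
  induction n with
  | zero =>
    intro ps h
    have hps : ps = [] := List.eq_nil_of_length_eq_zero (Nat.le_zero.mp h)
    subst hps
    rw [pvCollect]
    rfl
  | succ n ih =>
    intro ps h
    match ps with
    | [] =>
      rw [pvCollect]
      rfl
    | (key, t) :: rest =>
      have hrlen : (((key, t) :: rest).filter (fun p => !(p.1 == key))).length ≤ n := by
        simp only [List.filter_cons, BEq.refl, Bool.not_true]
        exact le_trans (List.length_filter_le _ _) (Nat.le_of_succ_le_succ h)
      have ih' := ih _ hrlen
      rw [pvCollect]
      by_cases hlen : 1 < ((((key, t) :: rest).filter (fun p => p.1 == key)).map Prod.snd).length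
      · rw [if_pos hlen, pvTarget_cons, if_pos hlen]
        rw [pvFresh_update key _ _ (by rw [ih']; exact pvTarget_nodup_keys _)
          (by
            intro p hp
            rw [ih'] at hp
            have hmem := pvTarget_mem_fst _ p hp
            have h2 : (((key, t) :: rest).filter (fun p => !(p.1 == key))).map Prod.fst
                = (((key, t) :: rest).map Prod.fst).filter (fun x => !(x == key)) := by
              rw [List.filter_map]; rfl
            rw [h2] at hmem
            have := List.mem_filter.mp hmem
            simpa using this.2)]
        rw [ih']
        rfl
      · rw [if_neg hlen, pvTarget_cons, if_neg hlen, ih']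
        rfl

theorem pvCollect_items (ps : List (String × List (String × String))) :
    (pvCollect ps).items = pvTarget ps :=
  pvCollect_items_aux ps.length ps le_rfl

-- ===== VERDICT (by name: the statement is the Claim_ definition above) =====
theorem find_near_duplicates_spec : Claim_equal_find_near_duplicates := by
  intro tasks _
  unfold Spec_find_near_duplicates find_near_duplicates find_near_duplicates_alt
  rw [pvA_fold, pvB_pairs, List.nil_append, pvG_items, pvCollect_items]
  rfl
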